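-- pv_equiv track=rewrite | github.com/mickgian/PratikoAi-BE | tests/contract/contract-test-framework.py | _match_path_with_params
-- ===== SOURCE A (Python) =====
-- def _match_path_with_params(spec_path: str, actual_path: str) -> bool:
--     """Match paths with parameter substitution."""
--     spec_parts = spec_path.split("/")
--     actual_parts = actual_path.split("/")
--
--     if len(spec_parts) != len(actual_parts):
--         return False
--
--     for spec_part, actual_part in zip(spec_parts, actual_parts, strict=False):
--         if spec_part.startswith("{") and spec_part.endswith("}"):
--             # Parameter placeholder, matches anything
--             continue
--         elif spec_part != actual_part:
--             return False
--
--     return True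
-- ===== SOURCE B (Python) =====
-- def _match_path_with_params(spec_path: str, actual_path: str) -> bool:
--     """Match paths with parameter substitution.
--
--     Splits only the spec; the actual path is consumed segment by segment
--     with str.partition, recursively."""
--
--     def seg_ok(part: str, seg: str) -> bool:
--         return (part.startswith("{") and part.endswith("}")) or part == seg
--
--     def go(parts, rest):
--         head, sep, tail = rest.partition("/")
--         if len(parts) == 1:
--             return sep == "" and seg_ok(parts[0], head)
--         return sep != "" and seg_ok(parts[0], head) and go(parts[1:], tail)
--
--     return go(spec_path.split("/"), actual_path)
-- ===== Notes on version B (the rewrite author's own statement) =====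
-- stated objective: alternative
-- what changed: A splits both paths and zips the two segment lists after a length check; B splits only the spec and consumes the actual path segment by segment with str.partition in a recursion, so segment-count agreement falls out of the separator checks instead of a length comparison.
import Mathlib
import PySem

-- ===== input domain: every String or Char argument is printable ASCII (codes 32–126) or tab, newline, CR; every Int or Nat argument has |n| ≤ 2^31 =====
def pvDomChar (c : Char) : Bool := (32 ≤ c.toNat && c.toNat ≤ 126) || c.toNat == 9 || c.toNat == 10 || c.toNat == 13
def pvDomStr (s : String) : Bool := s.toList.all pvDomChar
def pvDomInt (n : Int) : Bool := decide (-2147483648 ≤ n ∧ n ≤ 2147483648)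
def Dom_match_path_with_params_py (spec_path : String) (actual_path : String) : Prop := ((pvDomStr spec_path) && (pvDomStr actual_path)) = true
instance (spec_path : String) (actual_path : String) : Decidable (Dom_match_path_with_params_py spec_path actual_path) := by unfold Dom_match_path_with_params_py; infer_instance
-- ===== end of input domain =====

-- B splits only the spec and peels the actual path with str.partition in a recursion
-- (objective: alternative decomposition, same cost); both programs are total.

-- ===== PORT A =====
-- the for-loop over zip(spec_parts, actual_parts) with its early 'return False'
def pvLoopA : List (List Char × List Char) → Bool
  | [] => true
  | (spec_part, actual_part) :: rest =>
    if PySem.Chars.startswith spec_part ['{'] && PySem.Chars.endswith spec_part ['}'] then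
      pvLoopA rest
    else if spec_part ≠ actual_part then false
    else pvLoopA rest

def match_path_with_params_py (spec_path : String) (actual_path : String) : Bool :=
  let spec_parts := PySem.Chars.splitOn spec_path.toList ['/']
  let actual_parts := PySem.Chars.splitOn actual_path.toList ['/']
  if spec_parts.length ≠ actual_parts.length then false
  else pvLoopA (spec_parts.zip actual_parts)

-- ===== PORT B =====
def pvNotSlash (c : Char) : Bool := c ≠ '/'

-- rest.partition("/") — exact hand port for the single-character separator:
-- head = longest '/'-free prefix, the Bool records whether a '/' was found, tail = what follows it
def pvPartitionSlash (cs : List Char) : List Char × Bool × List Char :=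
  match cs.dropWhile pvNotSlash with
  | [] => (cs.takeWhile pvNotSlash, false, [])
  | _ :: t => (cs.takeWhile pvNotSlash, true, t)

def pvSegOk (part seg : List Char) : Bool :=
  (PySem.Chars.startswith part ['{'] && PySem.Chars.endswith part ['}']) || part == seg

def pvGoB : List (List Char) → List Char → Bool
  | [], _ => false   -- unreachable: str.split never returns an empty list
  | [p], rest =>
    let (head, sep, _) := pvPartitionSlash rest
    !sep && pvSegOk p head
  | p :: ps, rest =>
    let (head, sep, tail) := pvPartitionSlash rest
    sep && pvSegOk p head && pvGoB ps tail

def match_path_with_params_py_alt (spec_path : String) (actual_path : String) : Bool :=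
  pvGoB (PySem.Chars.splitOn spec_path.toList ['/']) actual_path.toList

-- ===== PRECONDITION & SPEC =====
def Spec_match_path_with_params_py (spec_path : String) (actual_path : String) (out : Bool) : Prop := out = match_path_with_params_py_alt spec_path actual_path
instance (spec_path : String) (actual_path : String) (out : Bool) : Decidable (Spec_match_path_with_params_py spec_path actual_path out) := by unfold Spec_match_path_with_params_py; infer_instance

-- ===== CLAIM (what is proved, stated in full; the proofs are below) =====
def Claim_equal_match_path_with_params_py : Prop := ∀ (spec_path : String) (actual_path : String), Dom_match_path_with_params_py spec_path actual_path → Spec_match_path_with_params_py spec_path actual_path (match_path_with_params_py spec_path actual_path)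

-- ===== LEMMAS AND PROOFS =====

-- proof-side clean recursion computing split on '/'
def pvSplitSlash (cs : List Char) : List (List Char) :=
  match h : cs.dropWhile pvNotSlash with
  | [] => [cs.takeWhile pvNotSlash]
  | _ :: t => cs.takeWhile pvNotSlash :: pvSplitSlash t
termination_by cs.length
decreasing_by
  have h1 : (cs.dropWhile pvNotSlash).length ≤ cs.length := List.length_dropWhile_le _ _
  rw [h] at h1; simp at h1; omega

lemma pvSplitSlash_of_drop_nil {cs : List Char} (h : cs.dropWhile pvNotSlash = []) :
    pvSplitSlash cs = [cs.takeWhile pvNotSlash] := by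
  rw [pvSplitSlash]; split <;> simp_all

lemma pvSplitSlash_of_drop_cons {cs d : List Char} {c : Char} (h : cs.dropWhile pvNotSlash = c :: d) :
    pvSplitSlash cs = cs.takeWhile pvNotSlash :: pvSplitSlash d := by
  rw [pvSplitSlash]; split <;> simp_all

lemma pvSplitSlash_ne_nil (cs : List Char) : pvSplitSlash cs ≠ [] := by
  rw [pvSplitSlash]; split <;> simp

lemma pvSplitSlash_slash (rest : List Char) :
    pvSplitSlash ('/' :: rest) = [] :: pvSplitSlash rest := by
  have hd : ('/' :: rest).dropWhile pvNotSlash = '/' :: rest := by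
    rw [List.dropWhile_cons]; simp [pvNotSlash]
  rw [pvSplitSlash_of_drop_cons hd, List.takeWhile_cons]
  simp [pvNotSlash]

lemma pvSplitSlash_cons_ne {c : Char} (rest : List Char) (hc : c ≠ '/') :
    pvSplitSlash (c :: rest)
      = (c :: (pvSplitSlash rest).headI) :: (pvSplitSlash rest).tail := by
  have hdw : (c :: rest).dropWhile pvNotSlash = rest.dropWhile pvNotSlash := by
    rw [List.dropWhile_cons]; simp [pvNotSlash, hc]
  have htw : (c :: rest).takeWhile pvNotSlash = c :: rest.takeWhile pvNotSlash := by
    rw [List.takeWhile_cons]; simp [pvNotSlash, hc]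
  rcases hd : rest.dropWhile pvNotSlash with _ | ⟨d, t⟩
  · rw [pvSplitSlash_of_drop_nil (hdw.trans hd), pvSplitSlash_of_drop_nil hd, htw]; simp
  · rw [pvSplitSlash_of_drop_cons (hdw.trans hd), pvSplitSlash_of_drop_cons hd, htw]; simp

lemma pvPartition_of_drop_nil {cs : List Char} (h : cs.dropWhile pvNotSlash = []) :
    pvPartitionSlash cs = (cs.takeWhile pvNotSlash, false, []) := by
  unfold pvPartitionSlash; rw [h]

lemma pvPartition_of_drop_cons {cs d : List Char} {c : Char} (h : cs.dropWhile pvNotSlash = c :: d) :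
    pvPartitionSlash cs = (cs.takeWhile pvNotSlash, true, d) := by
  unfold pvPartitionSlash; rw [h]

lemma pv_go_spec : ∀ (fuel : Nat) (l cur : List Char) (acc : List (List Char)),
    l.length ≤ fuel →
    PySem.Chars.splitOn.go ['/'] fuel l cur acc
      = acc.reverse ++ (cur.reverse ++ (pvSplitSlash l).headI) :: (pvSplitSlash l).tail := by
  intro fuel
  induction fuel with
  | zero =>
    intro l cur acc hl
    have : l = [] := by cases l <;> simp_all
    subst this
    rw [pvSplitSlash_of_drop_nil (by simp)]
    simp [PySem.Chars.splitOn.go]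
  | succ f ih =>
    intro l cur acc hl
    cases l with
    | nil =>
      rw [pvSplitSlash_of_drop_nil (by simp)]
      simp [PySem.Chars.splitOn.go]
    | cons c rest =>
      by_cases hc : c = '/'
      · subst hc
        have hpre : List.isPrefixOf ['/'] ('/' :: rest) = true := by simp [List.isPrefixOf]
        rw [show PySem.Chars.splitOn.go ['/'] (f+1) ('/' :: rest) cur acc
              = PySem.Chars.splitOn.go ['/'] f (List.drop 1 ('/' :: rest)) [] (cur.reverse :: acc) by
            simp [PySem.Chars.splitOn.go, hpre]]
        rw [ih _ _ _ (by simpa using Nat.le_of_succ_le_succ hl), pvSplitSlash_slash]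
        obtain ⟨x, xs, hx⟩ := List.exists_cons_of_ne_nil (pvSplitSlash_ne_nil rest)
        simp [hx]
      · have hpre : List.isPrefixOf ['/'] (c :: rest) = false := by
          simp [List.isPrefixOf]; exact fun h => hc h.symm
        rw [show PySem.Chars.splitOn.go ['/'] (f+1) (c :: rest) cur acc
              = PySem.Chars.splitOn.go ['/'] f rest (c :: cur) acc by
            simp [PySem.Chars.splitOn.go, hpre]]
        rw [ih _ _ _ (by simpa using Nat.le_of_succ_le_succ hl), pvSplitSlash_cons_ne rest hc]
        simp

lemma pv_splitOn_eq (l : List Char) : PySem.Chars.splitOn l ['/'] = pvSplitSlash l := by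
  have hgo := pv_go_spec (l.length + 1) l [] [] (by omega)
  rw [PySem.Chars.splitOn]
  rw [show PySem.Chars.splitOn.go ['/'] (l.length + 1) l [] []
        = ([] : List (List Char)).reverse
            ++ (([] : List Char).reverse ++ (pvSplitSlash l).headI) :: (pvSplitSlash l).tail from hgo]
  obtain ⟨x, xs, hx⟩ := List.exists_cons_of_ne_nil (pvSplitSlash_ne_nil l)
  simp [hx]

lemma pvLoopA_cons (s a : List Char) (r : List (List Char × List Char)) :
    pvLoopA ((s, a) :: r) = (pvSegOk s a && pvLoopA r) := by
  simp only [pvLoopA, pvSegOk]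
  by_cases h : (PySem.Chars.startswith s ['{'] && PySem.Chars.endswith s ['}']) = true
  · simp [h]
  · simp only [Bool.not_eq_true] at h
    by_cases he : s = a <;> simp [h, he]

lemma pvGoB_singleton (p : List Char) (rest : List Char) :
    pvGoB [p] rest = (!(pvPartitionSlash rest).2.1 && pvSegOk p (pvPartitionSlash rest).1) := rfl

lemma pvGoB_cons (p q : List Char) (qs : List (List Char)) (rest : List Char) :
    pvGoB (p :: q :: qs) rest
      = ((pvPartitionSlash rest).2.1 && pvSegOk p (pvPartitionSlash rest).1
          && pvGoB (q :: qs) (pvPartitionSlash rest).2.2) := rfl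

lemma pv_main : ∀ (parts : List (List Char)) (rest : List Char), parts ≠ [] →
    pvGoB parts rest
      = ((parts.length == (pvSplitSlash rest).length) && pvLoopA (parts.zip (pvSplitSlash rest))) := by
  intro parts
  induction parts with
  | nil => intro rest h; exact absurd rfl h
  | cons p ps ih =>
    intro rest _
    cases ps with
    | nil =>
      rcases hd : rest.dropWhile pvNotSlash with _ | ⟨c, t⟩
      · rw [pvGoB_singleton, pvPartition_of_drop_nil hd, pvSplitSlash_of_drop_nil hd]
        simp [List.zip_cons_cons, pvLoopA_cons, pvLoopA]
      · rw [pvGoB_singleton, pvPartition_of_drop_cons hd, pvSplitSlash_of_drop_cons hd]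
        have hlen : 0 < (pvSplitSlash t).length :=
          List.length_pos_of_ne_nil (pvSplitSlash_ne_nil t)
        have hne : ([p] : List (List Char)).length ≠ (rest.takeWhile pvNotSlash :: pvSplitSlash t).length := by
          simp only [List.length_cons, List.length_nil]; omega
        rw [beq_eq_false_iff_ne.mpr hne]; simp
    | cons q qs =>
      rcases hd : rest.dropWhile pvNotSlash with _ | ⟨c, t⟩
      · rw [pvGoB_cons, pvPartition_of_drop_nil hd, pvSplitSlash_of_drop_nil hd]
        have : ((p :: q :: qs).length == ([rest.takeWhile pvNotSlash] : List (List Char)).length) = false := by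
          simp
        rw [this]; simp
      · rw [pvGoB_cons, pvPartition_of_drop_cons hd, pvSplitSlash_of_drop_cons hd,
          ih t (by simp)]
        simp only [List.length_cons, List.zip_cons_cons, pvLoopA_cons]
        cases h1 : ((q :: qs).length == (pvSplitSlash t).length) <;>
          cases h2 : pvSegOk p (rest.takeWhile pvNotSlash) <;>
            simp_all

-- ===== VERDICT (by name: the statement is the Claim_ definition above) =====
theorem match_path_with_params_py_spec : Claim_equal_match_path_with_params_py := by
  intro spec_path actual_path _
  show match_path_with_params_py spec_path actual_path
      = match_path_with_params_py_alt spec_path actual_path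
  unfold match_path_with_params_py match_path_with_params_py_alt
  rw [pv_splitOn_eq, pv_splitOn_eq,
    pv_main _ _ (pvSplitSlash_ne_nil spec_path.toList)]
  by_cases h : (pvSplitSlash spec_path.toList).length = (pvSplitSlash actual_path.toList).length <;>
    simp [h]
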